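-- pv_equiv track=rewrite | github.com/SamirPaulb/LeetCode | 1465-maximum-area-of-a-piece-of-cake-after-horizontal-and-vertical-cuts/1465-maximum-area-of-a-piece-of-cake-after-horizontal-and-vertical-cuts.py | maxArea
-- ===== SOURCE A (Python) =====
-- from typing import List
--
-- def maxArea(h: int, w: int, horizontalCuts: List[int], verticalCuts: List[int]) -> int:
--     hc = horizontalCuts
--     if 0 not in hc: hc.append(0)
--     if h not in hc: hc.append(h)
--     hc.sort()
--
--     vc = verticalCuts
--     if 0 not in vc: vc.append(0)
--     if w not in vc: vc.append(w)
--     vc.sort()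
--
--     max_h = 0
--     for i in range(1, len(hc)):
--         max_h = max(max_h, hc[i] - hc[i-1])
--
--     max_c = 0
--     for i in range(1, len(vc)):
--         max_c = max(max_c, vc[i] - vc[i-1])
--
--     return (max_h * max_c) % (10**9 + 7)
-- ===== SOURCE B (Python) =====
-- def maxArea(h, w, horizontalCuts, verticalCuts):
--     # Nearest-neighbour search over the unsorted point set: no sorting, no mutation.
--     def largest_gap(end, cuts):
--         pts = {0, end, *cuts}
--         best = 0
--         for p in pts:
--             higher = [q - p for q in pts if q > p]
--             if higher:
--                 best = max(best, min(higher))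
--         return best
--     return largest_gap(h, horizontalCuts) * largest_gap(w, verticalCuts) % (10**9 + 7)
-- ===== Notes on version B (the rewrite author's own statement) =====
-- stated objective: alternative
-- what changed: B never sorts: for each axis it takes the distinct point set {0, end, *cuts} and finds the widest empty strip by a nearest-neighbour search (for every point, the minimum distance to a strictly larger point), taking the maximum of these distances; A appends boundaries in place, sorts, and scans adjacent pairs by index.
import Mathlib
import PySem

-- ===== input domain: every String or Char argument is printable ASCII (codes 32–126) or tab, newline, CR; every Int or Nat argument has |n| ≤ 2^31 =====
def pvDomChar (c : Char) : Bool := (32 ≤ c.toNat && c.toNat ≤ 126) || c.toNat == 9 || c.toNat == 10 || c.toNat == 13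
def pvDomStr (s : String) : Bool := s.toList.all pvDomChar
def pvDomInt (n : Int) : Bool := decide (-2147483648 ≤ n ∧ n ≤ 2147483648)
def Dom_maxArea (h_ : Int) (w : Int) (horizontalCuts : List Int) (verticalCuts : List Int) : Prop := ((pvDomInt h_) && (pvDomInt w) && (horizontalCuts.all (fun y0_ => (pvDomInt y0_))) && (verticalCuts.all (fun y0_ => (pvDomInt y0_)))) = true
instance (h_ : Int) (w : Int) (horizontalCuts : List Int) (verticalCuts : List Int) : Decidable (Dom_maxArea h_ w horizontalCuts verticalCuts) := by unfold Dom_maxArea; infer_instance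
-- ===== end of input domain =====

-- B replaces A's append/sort/adjacent-scan by a sort-free nearest-neighbour search over the
-- distinct point set (for each point, the minimum distance to a strictly larger point).
-- A mutates its list arguments in place (append/sort); the equivalence proved here is about
-- the RETURN value only — B performs no mutation.

-- ===== PORT A =====
def maxArea (h_ : Int) (w : Int) (horizontalCuts : List Int) (verticalCuts : List Int) : Int :=
  let hc := horizontalCuts
  let hc := if (0 : Int) ∈ hc then hc else hc ++ [0]
  let hc := if h_ ∈ hc then hc else hc ++ [h_]
  let hc := PySem.List.sorted hc (fun x => x) false
  let vc := verticalCuts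
  let vc := if (0 : Int) ∈ vc then vc else vc ++ [0]
  let vc := if w ∈ vc then vc else vc ++ [w]
  let vc := PySem.List.sorted vc (fun x => x) false
  let max_h := (PySem.List.pyRange 1 (hc.length : Int) 1).foldl
    (fun m i => max m (PySem.List.pyGetD hc i 0 - PySem.List.pyGetD hc (i - 1) 0)) 0
  let max_c := (PySem.List.pyRange 1 (vc.length : Int) 1).foldl
    (fun m i => max m (PySem.List.pyGetD vc i 0 - PySem.List.pyGetD vc (i - 1) 0)) 0
  PySem.Int.mod (max_h * max_c) (10 ^ 9 + 7)

-- ===== PORT B =====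
-- largest_gap(end, cuts) from Source B: for each p in the set {0, end, *cuts}, the list of
-- distances to strictly larger points; best = max of the minima ('min(higher)' is guarded
-- by 'if higher:', so min? is always applied to a nonempty list)
def pvLargestGap (end_ : Int) (cuts : List Int) : Int :=
  let pts : PySem.Set Int := PySem.Set.ofList (0 :: end_ :: cuts)
  pts.foldl (fun best p =>
    let higher := (pts.filter (fun q => p < q)).map (fun q => q - p)
    if higher = [] then best
    else max best ((PySem.List.min? higher (fun x => x)).getD 0)) 0

def maxArea_alt (h_ : Int) (w : Int) (horizontalCuts : List Int) (verticalCuts : List Int) : Int :=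
  PySem.Int.mod (pvLargestGap h_ horizontalCuts * pvLargestGap w verticalCuts) (10 ^ 9 + 7)

-- ===== PRECONDITION & SPEC =====
def Spec_maxArea (h_ : Int) (w : Int) (horizontalCuts : List Int) (verticalCuts : List Int) (out : Int) : Prop := out = maxArea_alt h_ w horizontalCuts verticalCuts
instance (h_ : Int) (w : Int) (horizontalCuts : List Int) (verticalCuts : List Int) (out : Int) : Decidable (Spec_maxArea h_ w horizontalCuts verticalCuts out) := by unfold Spec_maxArea; infer_instance

-- ===== CLAIM (what is proved, stated in full; the proofs are below) =====
def Claim_equal_maxArea : Prop := ∀ (h_ : Int) (w : Int) (horizontalCuts : List Int) (verticalCuts : List Int), Dom_maxArea h_ w horizontalCuts verticalCuts → Spec_maxArea h_ w horizontalCuts verticalCuts (maxArea h_ w horizontalCuts verticalCuts)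

-- ===== LEMMAS AND PROOFS =====

-- adjacent differences of a list
def pvGaps (l : List Int) : List Int := (List.zip l l.tail).map (fun p => p.2 - p.1)

lemma pvGaps_cons_cons (a b : Int) (t : List Int) :
    pvGaps (a :: b :: t) = (b - a) :: pvGaps (b :: t) := rfl

-- adjacent-duplicate removal
def pvDd : List Int → List Int
  | [] => []
  | [a] => [a]
  | a :: b :: t => if a = b then pvDd (b :: t) else a :: pvDd (b :: t)

lemma pvMem_dd (x : Int) : ∀ l : List Int, x ∈ pvDd l ↔ x ∈ l := by
  intro l
  induction l using pvDd.induct with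
  | case1 => simp [pvDd]
  | case2 a => simp [pvDd]
  | case3 b t ih =>
    rw [show pvDd (b :: b :: t) = pvDd (b :: t) from by simp [pvDd], ih]
    simp
  | case4 a b t hab ih =>
    simp [pvDd, if_neg hab, ih]

lemma pvDd_head : ∀ (b : Int) (t : List Int), ∃ r, pvDd (b :: t) = b :: r := by
  intro b t
  induction t generalizing b with
  | nil => exact ⟨[], rfl⟩
  | cons c t ih =>
    by_cases h : b = c
    · obtain ⟨r, hr⟩ := ih c
      exact ⟨r, by simp [pvDd, hr, h]⟩
    · exact ⟨pvDd (c :: t), by simp [pvDd, if_neg h]⟩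

lemma pvDd_pairwise_lt : ∀ l : List Int, l.Pairwise (· ≤ ·) → (pvDd l).Pairwise (· < ·) := by
  intro l
  induction l using pvDd.induct with
  | case1 => intro _; simp [pvDd]
  | case2 a => intro _; simp [pvDd]
  | case3 b t ih =>
    intro hp
    simpa [pvDd, if_pos rfl] using ih hp.of_cons
  | case4 a b t hab ih =>
    intro hp
    simp only [pvDd, if_neg hab]
    refine List.Pairwise.cons ?_ (ih hp.of_cons)
    intro x hx
    have hxbt : x ∈ b :: t := (pvMem_dd x (b :: t)).mp hx
    have hb : a ≤ b := (List.pairwise_cons.mp hp).1 b (by simp)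
    have hblt : a < b := lt_of_le_of_ne hb hab
    have hbx : b ≤ x := by
      rcases List.mem_cons.mp hxbt with h | h
      · omega
      · exact (List.pairwise_cons.mp hp.of_cons).1 x h
    omega

lemma pvFoldl_max_pull (g : List Int) : ∀ m c : Int,
    List.foldl max (max m c) g = max c (List.foldl max m g) := by
  induction g with
  | nil => intro m c; simp [max_comm]
  | cons x g ih =>
    intro m c
    have h1 : max (max m c) x = max (max m x) c := by
      simp [max_comm, max_left_comm]
    simp only [List.foldl_cons, h1, ih]

def pvGm (l : List Int) : Int := List.foldl max 0 (pvGaps l)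

lemma pvGm_cons_cons (a b : Int) (t : List Int) :
    pvGm (a :: b :: t) = max (b - a) (pvGm (b :: t)) := by
  simp only [pvGm, pvGaps_cons_cons, List.foldl_cons]
  exact pvFoldl_max_pull _ 0 (b - a)

lemma pvGm_nonneg (l : List Int) : 0 ≤ pvGm l :=
  (PySem.List.le_foldl_max (pvGaps l) 0).1

lemma pvGm_dd : ∀ l : List Int, l.Pairwise (· ≤ ·) → pvGm l = pvGm (pvDd l) := by
  intro l
  induction l using pvDd.induct with
  | case1 => intro _; rfl
  | case2 a => intro _; rfl
  | case3 b t ih =>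
    intro hp
    rw [pvGm_cons_cons, pvDd, if_pos rfl, ← ih hp.of_cons]
    simp [max_eq_right (pvGm_nonneg (b :: t))]
  | case4 a b t hab ih =>
    intro hp
    obtain ⟨r, hr⟩ := pvDd_head b t
    rw [pvGm_cons_cons, pvDd, if_neg hab, ih hp.of_cons, hr, pvGm_cons_cons]

lemma pvGaps_concat (l : List Int) (hl : l ≠ []) (y : Int) :
    pvGaps (l ++ [y]) = pvGaps l ++ [y - l.getLast hl] := by
  induction l with
  | nil => exact absurd rfl hl
  | cons a t ih =>
    cases t with
    | nil => simp [pvGaps]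
    | cons b t' =>
      have hne : b :: t' ≠ [] := by simp
      calc pvGaps ((a :: b :: t') ++ [y])
          = (b - a) :: pvGaps ((b :: t') ++ [y]) := rfl
        _ = (b - a) :: (pvGaps (b :: t') ++ [y - (b :: t').getLast hne]) := by rw [ih hne]
        _ = pvGaps (a :: b :: t') ++ [y - (a :: b :: t').getLast hl] := by
              simp [pvGaps_cons_cons, List.getLast_cons]

lemma pvGetD_append_left (l : List Int) (y i : Int) (h0 : 0 ≤ i) (h1 : i < (l.length : Int)) :
    PySem.List.pyGetD (l ++ [y]) i 0 = PySem.List.pyGetD l i 0 := by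
  rw [PySem.List.pyGetD_eq_getElem (l ++ [y]) 0 h0 (by simp; omega),
      PySem.List.pyGetD_eq_getElem l 0 h0 h1]
  exact List.getElem_append_left (by omega)

-- A's index loop equals the fold of max over adjacent differences
lemma pvLoopA_eq (l : List Int) (m : Int) :
    (PySem.List.pyRange 1 (l.length : Int) 1).foldl
      (fun m i => max m (PySem.List.pyGetD l i 0 - PySem.List.pyGetD l (i - 1) 0)) m
    = List.foldl max m (pvGaps l) := by
  induction l using List.reverseRecOn generalizing m with
  | nil => rw [PySem.List.pyRange_one_eq_nil (by simp)]; rfl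
  | append_singleton l' y ih =>
    rcases eq_or_ne l' [] with rfl | hne
    · rw [show (([] ++ [y] : List Int).length : Int) = 1 from by simp,
          PySem.List.pyRange_one_eq_nil (by omega)]
      rfl
    · have hpos : 0 < l'.length := List.length_pos_iff.mpr hne
      have hlen1 : (1 : Int) ≤ (l'.length : Int) := by exact_mod_cast hpos
      rw [show (((l' ++ [y]).length : Int)) = (l'.length : Int) + 1 from by simp,
          PySem.List.pyRange_one_succ_right (a := 1) (by omega), List.foldl_append]
      have hpref : List.foldl
          (fun m i => max m (PySem.List.pyGetD (l' ++ [y]) i 0 - PySem.List.pyGetD (l' ++ [y]) (i - 1) 0)) m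
          (PySem.List.pyRange 1 (l'.length : Int) 1)
          = List.foldl
          (fun m i => max m (PySem.List.pyGetD l' i 0 - PySem.List.pyGetD l' (i - 1) 0)) m
          (PySem.List.pyRange 1 (l'.length : Int) 1) := by
        apply PySem.List.foldl_congr_mem
        intro acc i hi
        obtain ⟨hi1, hi2⟩ := PySem.List.mem_pyRange_one.mp hi
        rw [pvGetD_append_left l' y i (by omega) (by omega),
            pvGetD_append_left l' y (i - 1) (by omega) (by omega)]
      rw [hpref, ih]
      have h1 : PySem.List.pyGetD (l' ++ [y]) (l'.length : Int) 0 = y := by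
        rw [PySem.List.pyGetD_eq_getElem (l' ++ [y]) 0 (by omega) (by simp)]
        simp
      have h2 : PySem.List.pyGetD (l' ++ [y]) ((l'.length : Int) - 1) 0 = l'.getLast hne := by
        rw [pvGetD_append_left l' y _ (by omega) (by omega),
            PySem.List.pyGetD_eq_getElem l' 0 (by omega) (by omega), List.getLast_eq_getElem]
        congr 1
        omega
      rw [pvGaps_concat l' hne y, List.foldl_append]
      simp only [List.foldl_cons, List.foldl_nil]
      rw [h1, h2]

-- ---- B-side ----

-- gap value of a point p relative to the point list M
def pvG (M : List Int) (p : Int) : Int :=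
  let hi := (M.filter (fun q => p < q)).map (fun q => q - p)
  if hi = [] then 0 else (PySem.List.min? hi (fun x => x)).getD 0

-- B's fold is the fold of max over the per-point gap values
lemma pvStep_eq_max (M l : List Int) : ∀ b : Int, 0 ≤ b →
    l.foldl (fun best p =>
      let hi := (M.filter (fun q => p < q)).map (fun q => q - p)
      if hi = [] then best else max best ((PySem.List.min? hi (fun x => x)).getD 0)) b
    = l.foldl (fun best p => max best (pvG M p)) b := by
  induction l with
  | nil => intro b _; rfl
  | cons p l ih =>
    intro b hb
    simp only [List.foldl_cons, pvG]
    by_cases h : (M.filter (fun q => p < q)).map (fun q => q - p) = []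
    · rw [if_pos h, if_pos h, max_eq_left hb, ih b hb]
      rfl
    · rw [if_neg h, if_neg h, ih _ (le_trans hb (le_max_left _ _))]
      rfl

-- membership in the 'higher' list
lemma pvMem_hi (M : List Int) (p y : Int) :
    y ∈ (M.filter (fun q => p < q)).map (fun q => q - p) ↔ ∃ q ∈ M, p < q ∧ y = q - p := by
  simp only [List.mem_map, List.mem_filter, decide_eq_true_eq]
  constructor
  · rintro ⟨q, ⟨hq, hpq⟩, rfl⟩; exact ⟨q, hq, hpq, rfl⟩
  · rintro ⟨q, hq, hpq, rfl⟩; exact ⟨q, ⟨hq, hpq⟩, rfl⟩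

-- pvG depends only on the member-set of M
lemma pvG_congr (M M' : List Int) (hm : ∀ x, x ∈ M ↔ x ∈ M') (p : Int) :
    pvG M p = pvG M' p := by
  unfold pvG
  have hiff : ∀ y, y ∈ (M.filter (fun q => p < q)).map (fun q => q - p) ↔
      y ∈ (M'.filter (fun q => p < q)).map (fun q => q - p) := by
    intro y; rw [pvMem_hi, pvMem_hi]
    constructor
    · rintro ⟨q, hq, h⟩; exact ⟨q, (hm q).mp hq, h⟩
    · rintro ⟨q, hq, h⟩; exact ⟨q, (hm q).mpr hq, h⟩
  by_cases h : (M.filter (fun q => p < q)).map (fun q => q - p) = []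
  · have h' : (M'.filter (fun q => p < q)).map (fun q => q - p) = [] := by
      rcases hM' : (M'.filter (fun q => p < q)).map (fun q => q - p) with _ | ⟨y, t⟩
      · rfl
      · have : y ∈ (M.filter (fun q => p < q)).map (fun q => q - p) :=
          (hiff y).mpr (by rw [hM']; simp)
        rw [h] at this; simp at this
    rw [if_pos h, if_pos h']
  · have h' : (M'.filter (fun q => p < q)).map (fun q => q - p) ≠ [] := by
      rcases hM : (M.filter (fun q => p < q)).map (fun q => q - p) with _ | ⟨y, t⟩
      · exact absurd hM h
      · intro hnil
        have : y ∈ (M'.filter (fun q => p < q)).map (fun q => q - p) :=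
          (hiff y).mp (by rw [hM]; simp)
        rw [hnil] at this; simp at this
    rw [if_neg h, if_neg h']
    obtain ⟨m, hmq⟩ : ∃ m, PySem.List.min?
        ((M.filter (fun q => p < q)).map (fun q => q - p)) (fun x => x) = some m := by
      cases hmin : PySem.List.min? ((M.filter (fun q => p < q)).map (fun q => q - p)) (fun x => x) with
      | none => exact absurd ((PySem.List.min?_eq_none_iff _ _).mp hmin) h
      | some m => exact ⟨m, rfl⟩
    obtain ⟨m', hmq'⟩ : ∃ m', PySem.List.min?
        ((M'.filter (fun q => p < q)).map (fun q => q - p)) (fun x => x) = some m' := by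
      cases hmin : PySem.List.min? ((M'.filter (fun q => p < q)).map (fun q => q - p)) (fun x => x) with
      | none => exact absurd ((PySem.List.min?_eq_none_iff _ _).mp hmin) h'
      | some m => exact ⟨m, rfl⟩
    rw [hmq, hmq', Option.getD_some, Option.getD_some]
    have hmem := PySem.List.min?_mem hmq
    have hmem' := PySem.List.min?_mem hmq'
    have hle := PySem.List.min?_isMin hmq
    have hle' := PySem.List.min?_isMin hmq'
    exact le_antisymm (hle m' ((hiff m').mpr hmem')) (hle' m ((hiff m).mp hmem))

-- foldl max is invariant under permutation
lemma pvFoldl_max_perm {l l' : List Int} (h : l.Perm l') : ∀ b : Int,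
    l.foldl max b = l'.foldl max b := by
  induction h with
  | nil => intro b; rfl
  | cons x _ ih => intro b; simp only [List.foldl_cons, ih]
  | swap x y l => intro b; simp only [List.foldl_cons, max_right_comm]
  | trans _ _ ih1 ih2 => intro b; rw [ih1, ih2]

-- foldl min leaves the accumulator if it is a lower bound
lemma pvFoldl_min_lb (l : List Int) (a : Int) (h : ∀ y ∈ l, a ≤ y) :
    l.foldl min a = a := by
  rcases PySem.List.foldl_min_mem l a with heq | hmem
  · exact heq
  · exact le_antisymm (PySem.List.foldl_min_le l a).1 (h _ hmem)

-- on a strictly sorted list, the fold of max over pvG values is the max adjacent gap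
lemma pvB_sorted (D : List Int) (hp : D.Pairwise (· < ·)) :
    List.foldl max 0 (D.map (pvG D)) = pvGm D := by
  induction D with
  | nil => rfl
  | cons a t ih =>
    cases t with
    | nil =>
      have : pvG [a] a = 0 := by simp [pvG]
      simp [this, pvGm, pvGaps]
    | cons b t' =>
      have hp' : (b :: t').Pairwise (· < ·) := hp.of_cons
      have halt : ∀ x ∈ b :: t', a < x := (List.pairwise_cons.mp hp).1
      -- the filter for a is the whole tail
      have hfa : (a :: b :: t').filter (fun q => a < q) = b :: t' := by
        rw [List.filter_cons]
        simp only [lt_irrefl, decide_false]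
        exact List.filter_eq_self.mpr (fun x hx => decide_eq_true (halt x hx))
      -- pvG of the head is the head gap
      have hga : pvG (a :: b :: t') a = b - a := by
        unfold pvG
        rw [hfa]
        simp only [List.map_cons, PySem.List.min?_id_cons]
        rw [if_neg (by simp), Option.getD_some]
        apply pvFoldl_min_lb
        intro y hy
        obtain ⟨q, hq, rfl⟩ := List.mem_map.mp hy
        have : b < q := (List.pairwise_cons.mp hp').1 q hq
        omega
      -- pvG of a tail point ignores the head
      have hgt : ∀ p ∈ b :: t', pvG (a :: b :: t') p = pvG (b :: t') p := by
        intro p hpmem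
        unfold pvG
        have : (a :: b :: t').filter (fun q => p < q) = (b :: t').filter (fun q => p < q) := by
          rw [List.filter_cons]
          have : ¬ p < a := not_lt.mpr (le_of_lt (halt p hpmem))
          simp [this]
        rw [this]
      rw [List.map_cons, List.foldl_cons,
          List.map_congr_left hgt, pvFoldl_max_pull _ 0 (pvG (a :: b :: t') a), hga,
          ih hp', pvGm_cons_cons]

-- the two per-axis computations agree
lemma pvGap_eq (e : Int) (cuts : List Int) :
    (let c := if (0 : Int) ∈ cuts then cuts else cuts ++ [0]
     let c := if e ∈ c then c else c ++ [e]
     let c := PySem.List.sorted c (fun x => x) false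
     (PySem.List.pyRange 1 (c.length : Int) 1).foldl
       (fun m i => max m (PySem.List.pyGetD c i 0 - PySem.List.pyGetD c (i - 1) 0)) 0)
    = pvLargestGap e cuts := by
  set c1 : List Int := if (0 : Int) ∈ cuts then cuts else cuts ++ [0] with hc1
  set c2 : List Int := if e ∈ c1 then c1 else c1 ++ [e] with hc2
  set l : List Int := PySem.List.sorted c2 (fun x => x) false with hl3
  show List.foldl (fun m i => max m (PySem.List.pyGetD l i 0 - PySem.List.pyGetD l (i - 1) 0)) 0
      (PySem.List.pyRange 1 (l.length : Int) 1) = pvLargestGap e cuts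
  have hpl : l.Pairwise (· ≤ ·) := PySem.List.sorted_pairwise c2 (fun x => x)
  rw [pvLoopA_eq l 0, show List.foldl max 0 (pvGaps l) = pvGm l from rfl, pvGm_dd l hpl]
  -- B's side
  set S : List Int := PySem.Set.ofList (0 :: e :: cuts) with hS
  have hB : pvLargestGap e cuts = List.foldl max 0 (S.map (pvG S)) := by
    unfold pvLargestGap
    rw [← hS, pvStep_eq_max S S 0 le_rfl, List.foldl_map]
  rw [hB]
  -- same member-set
  have hmem : ∀ x, x ∈ S ↔ x ∈ pvDd l := by
    intro x
    rw [pvMem_dd, hS, PySem.Set.mem_ofList, hl3, PySem.List.mem_sorted, hc2]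
    by_cases h0 : (0 : Int) ∈ cuts <;> by_cases he : e ∈ c1 <;>
      simp_all [List.mem_append] <;> aesop
  have hperm : S.Perm (pvDd l) :=
    (List.perm_ext_iff_of_nodup (PySem.Set.nodup_ofList _)
      ((pvDd_pairwise_lt l hpl).imp (fun h => LT.lt.ne h))).mpr hmem
  refine Eq.symm ?_
  calc List.foldl max 0 (S.map (pvG S))
      = List.foldl max 0 (S.map (pvG (pvDd l))) := by
        rw [List.map_congr_left (fun p _ => pvG_congr S (pvDd l) hmem p)]
    _ = List.foldl max 0 ((pvDd l).map (pvG (pvDd l))) :=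
        pvFoldl_max_perm (hperm.map _) 0
    _ = pvGm (pvDd l) := pvB_sorted (pvDd l) (pvDd_pairwise_lt l hpl)

-- ===== VERDICT (by name: the statement is the Claim_ definition above) =====
theorem maxArea_spec : Claim_equal_maxArea := by
  intro h_ w hc vc _
  show _ = _
  unfold maxArea maxArea_alt
  rw [← pvGap_eq h_ hc, ← pvGap_eq w vc]
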